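-- pv_equiv track=rewrite | github.com/culbec/CRYPTO | rsa/rsa.py | _letters_to_num
-- ===== SOURCE A (Python) =====
-- import string
--
-- ALPHABET: str = string.ascii_uppercase + "_"
--
-- ALPHABET_LEN: int = len(ALPHABET)
--
-- def _letters_to_num(letters: str) -> int:
--     num = 0
--     for letter in letters:
--         if letter == "_":
--             num *= ALPHABET_LEN
--         else:
--             num = num * ALPHABET_LEN + (ord(letter) - (ord(ALPHABET[0]) - 1))
--     return num
-- ===== SOURCE B (Python) =====
-- def _letters_to_num(letters: str) -> int:
--     digits = [0 if c == "_" else ord(c) - 64 for c in letters]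
--     num = 0
--     weight = 1
--     for d in reversed(digits):
--         num += d * weight
--         weight *= 27
--     return num
-- ===== Notes on version B (the rewrite author's own statement) =====
-- stated objective: alternative
-- what changed: Replaces Horner's left-to-right multiply-accumulate with a digit-list precomputation followed by a right-to-left positional-weight accumulation (num += d*weight; weight *= 27).
import Mathlib
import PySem

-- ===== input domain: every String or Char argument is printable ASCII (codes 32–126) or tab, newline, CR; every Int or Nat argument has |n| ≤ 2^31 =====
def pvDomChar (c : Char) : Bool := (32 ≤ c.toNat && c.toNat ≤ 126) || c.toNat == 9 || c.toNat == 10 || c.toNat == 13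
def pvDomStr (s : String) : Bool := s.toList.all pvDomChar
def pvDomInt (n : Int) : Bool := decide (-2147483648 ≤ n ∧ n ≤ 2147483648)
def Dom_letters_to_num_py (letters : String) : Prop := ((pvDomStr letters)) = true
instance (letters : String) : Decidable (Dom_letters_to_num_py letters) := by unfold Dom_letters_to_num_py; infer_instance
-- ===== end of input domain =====

-- B replaces A's left-to-right Horner accumulation by a precomputed digit list folded
-- right-to-left with an explicit positional weight (objective: alternative decomposition).

-- ===== PORT A =====
-- for letter in letters: if letter == "_": num *= 27 else: num = num*27 + (ord(letter) - 64)
def letters_to_num_py (letters : String) : Int :=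
  letters.toList.foldl
    (fun num letter =>
      if letter = '_' then num * 27
      else num * 27 + ((letter.toNat : Int) - 64))
    0

-- ===== PORT B =====
-- digit value of one character
def pvDigitB (c : Char) : Int := if c = '_' then 0 else (c.toNat : Int) - 64

-- the right-to-left loop over the reversed digit list, state = (num, weight)
def pvLoopB : List Int → Int × Int → Int × Int
  | [], s => s
  | d :: ds, (num, weight) => pvLoopB ds (num + d * weight, weight * 27)

def letters_to_num_py_alt (letters : String) : Int :=
  let digits := letters.toList.map pvDigitB
  (pvLoopB digits.reverse (0, 1)).1

-- ===== PRECONDITION & SPEC =====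
def Spec_letters_to_num_py (letters : String) (out : Int) : Prop := out = letters_to_num_py_alt letters
instance (letters : String) (out : Int) : Decidable (Spec_letters_to_num_py letters out) := by unfold Spec_letters_to_num_py; infer_instance

-- ===== CLAIM (what is proved, stated in full; the proofs are below) =====
def Claim_equal_letters_to_num_py : Prop := ∀ (letters : String), Dom_letters_to_num_py letters → Spec_letters_to_num_py letters (letters_to_num_py letters)

-- ===== LEMMAS AND PROOFS =====

-- value of a least-significant-first digit list
def pvVal : List Int → Int
  | [] => 0
  | d :: ds => d + 27 * pvVal ds

theorem pvLoopB_fst (ds : List Int) (num weight : Int) :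
    (pvLoopB ds (num, weight)).1 = num + weight * pvVal ds := by
  induction ds generalizing num weight with
  | nil => simp [pvLoopB, pvVal]
  | cons d ds ih => simp [pvLoopB, pvVal, ih]; ring

theorem pvA_append (l : List Char) (c : Char) :
    (l ++ [c]).foldl
      (fun num letter =>
        if letter = '_' then num * 27
        else num * 27 + ((letter.toNat : Int) - 64)) 0
    = 27 * (l.foldl
      (fun num letter =>
        if letter = '_' then num * 27
        else num * 27 + ((letter.toNat : Int) - 64)) 0) + pvDigitB c := by
  rw [List.foldl_append]
  simp only [List.foldl, pvDigitB]
  split <;> ring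

theorem pv_main (l : List Char) :
    l.foldl
      (fun num letter =>
        if letter = '_' then num * 27
        else num * 27 + ((letter.toNat : Int) - 64)) 0
    = pvVal (l.map pvDigitB).reverse := by
  induction l using List.reverseRecOn with
  | nil => simp [pvVal]
  | append_singleton l c ih =>
      rw [pvA_append, ih]
      simp [pvVal]
      ring

-- ===== VERDICT (by name: the statement is the Claim_ definition above) =====
theorem letters_to_num_py_spec : Claim_equal_letters_to_num_py := by
  intro letters _
  unfold Spec_letters_to_num_py letters_to_num_py letters_to_num_py_alt
  rw [pvLoopB_fst, pv_main]
  ring
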